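-- pv_equiv track=rewrite | github.com/adkrivonosik-droid/Adel | storage.py | delete_record
-- ===== SOURCE A (Python) =====
-- from typing import Any
--
-- def sort_records(records: list[dict[str, Any]]) -> list[dict[str, Any]]:
--     return sorted(
--         records,
--         key=lambda item: (item.get("date", ""), item.get("created_at", ""), item.get("id", "")),
--         reverse=True,
--     )
--
-- def delete_record(records: list[dict[str, Any]], record_id: str) -> tuple[list[dict[str, Any]], dict[str, Any] | None]:
--     removed = None
--     remaining = []
--     for record in records:
--         if record["id"] == record_id and removed is None:
--             removed = record
--             continue
--         remaining.append(record)
--     return sort_records(remaining), removed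
-- ===== SOURCE B (Python) =====
-- def delete_record(records, record_id):
--     # positions of all matching records (touches every record's "id", like A)
--     matches = [i for i, r in enumerate(records) if r["id"] == record_id]
--     if matches:
--         i = matches[0]
--         removed = records[i]
--         remaining = records[:i] + records[i + 1:]
--     else:
--         removed = None
--         remaining = list(records)
--     key = lambda r: (r.get("date", ""), r.get("created_at", ""), r.get("id", ""))
--     return sorted(remaining, key=key, reverse=True), removed
-- ===== Notes on version B (the rewrite author's own statement) =====
-- stated objective: alternative
-- what changed: Replaces A's flag-tracking accumulator loop with an index-based decomposition: collect all matching positions with enumerate, then remove the first one by slicing (records[:i] + records[i+1:]) and sort, instead of threading a 'removed' sentinel through an append loop.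
import Mathlib
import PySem

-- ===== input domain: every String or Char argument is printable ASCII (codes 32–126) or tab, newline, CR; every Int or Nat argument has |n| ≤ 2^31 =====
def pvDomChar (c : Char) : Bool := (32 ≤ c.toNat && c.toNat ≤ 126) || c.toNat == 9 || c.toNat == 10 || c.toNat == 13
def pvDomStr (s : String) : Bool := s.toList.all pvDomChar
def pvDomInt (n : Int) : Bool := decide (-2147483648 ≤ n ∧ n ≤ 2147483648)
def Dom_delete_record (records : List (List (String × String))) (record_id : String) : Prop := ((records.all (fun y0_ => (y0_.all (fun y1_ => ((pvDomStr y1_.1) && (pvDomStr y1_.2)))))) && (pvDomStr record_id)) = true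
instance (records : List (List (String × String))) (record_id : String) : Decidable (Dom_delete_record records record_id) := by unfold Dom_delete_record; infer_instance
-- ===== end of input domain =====

-- B replaces A's flag-tracking accumulator loop by an index-based decomposition (collect matching
-- positions, remove the first by slicing, then sort) — an alternative of the same cost.


-- ===== PORT A =====
-- Python's tuple key (date, created_at, id) compares lexicographically; on Dom every character
-- code is ≥ 9, so joining the components with NUL ('\x00') gives a single string whose String '<'
-- (codepoint-lexicographic) realises exactly that tuple order; exact on Dom (no NUL in any string).
def pvKey (item : List (String × String)) : String :=
  PySem.Dict.getD (PySem.Dict.mk item) "date" "" ++ "\x00" ++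
    PySem.Dict.getD (PySem.Dict.mk item) "created_at" "" ++ "\x00" ++
      PySem.Dict.getD (PySem.Dict.mk item) "id" ""

def sort_records (records : List (List (String × String))) : List (List (String × String)) :=
  PySem.List.sorted records pvKey true

-- loop body of A's for-loop, state = (removed, remaining)
def pvStepA (record_id : String)
    (s : Option (List (String × String)) × List (List (String × String)))
    (record : List (String × String)) :
    Option (List (String × String)) × List (List (String × String)) :=
  if (PySem.Dict.get? (PySem.Dict.mk record) "id" == some record_id) && s.1.isNone then
    (some record, s.2)
  else
    (s.1, s.2 ++ [record])

def delete_record (records : List (List (String × String))) (record_id : String) :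
    (List (List (String × String))) × (Option (List (String × String))) :=
  let st := records.foldl (pvStepA record_id) (none, [])
  (sort_records st.2, st.1)

-- ===== PORT B =====
def delete_record_alt (records : List (List (String × String))) (record_id : String) :
    (List (List (String × String))) × (Option (List (String × String))) :=
  let ms := ((PySem.List.enumerate records).filter
      (fun p => PySem.Dict.get? (PySem.Dict.mk p.2) "id" == some record_id)).map (·.1)
  match ms with
  | [] => (PySem.List.sorted records pvKey true, none)
  | i :: _ =>
      (PySem.List.sorted
        (PySem.List.slice records none (some i) ++ PySem.List.slice records (some (i + 1)) none)
        pvKey true,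
       some (PySem.List.pyGetD records i []))

-- ===== PRECONDITION & SPEC =====
-- Pre_ excludes exactly the inputs where some record lacks the key "id": there Python A (and B) raise KeyError.
def Pre_delete_record (records : List (List (String × String))) (record_id : String) : Prop :=
  ∀ r ∈ records, (PySem.Dict.get? (PySem.Dict.mk r) "id").isSome
instance (records : List (List (String × String))) (record_id : String) : Decidable (Pre_delete_record records record_id) := by unfold Pre_delete_record; infer_instance

def pvWitness_delete_record : (List (List (String × String))) × String :=
  ([[("id", "1"), ("date", "2024")], [("id", "2")]], "2")

def Spec_delete_record (records : List (List (String × String))) (record_id : String) (out : (List (List (String × String))) × (Option (List (String × String)))) : Prop := out = delete_record_alt records record_id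
instance (records : List (List (String × String))) (record_id : String) (out : (List (List (String × String))) × (Option (List (String × String)))) : Decidable (Spec_delete_record records record_id out) := by unfold Spec_delete_record; infer_instance

-- ===== CLAIM (what is proved, stated in full; the proofs are below) =====
def Claim_equal_delete_record : Prop := ∀ (records : List (List (String × String))) (record_id : String), Dom_delete_record records record_id → Pre_delete_record records record_id → Spec_delete_record records record_id (delete_record records record_id)

-- ===== LEMMAS AND PROOFS =====

-- Abbreviation for the match test (used only in the proofs).
def pvCond (record_id : String) (r : List (String × String)) : Bool :=
  PySem.Dict.get? (PySem.Dict.mk r) "id" == some record_id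

-- Once removed is set, A's loop only appends.
theorem pvFoldA_some (record_id : String) (rs : List (List (String × String)))
    (r0 : List (String × String)) (acc : List (List (String × String))) :
    rs.foldl (pvStepA record_id) (some r0, acc) = (some r0, acc ++ rs) := by
  induction rs generalizing acc with
  | nil => simp
  | cons r rs ih => simp [pvStepA, ih]

-- If no record matches, A's loop appends everything.
theorem pvFoldA_none (record_id : String) (rs : List (List (String × String)))
    (acc : List (List (String × String)))
    (h : ∀ r ∈ rs, pvCond record_id r = false) :
    rs.foldl (pvStepA record_id) (none, acc) = (none, acc ++ rs) := by
  induction rs generalizing acc with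
  | nil => simp
  | cons r rs ih =>
      have hr : pvCond record_id r = false := h r (by simp)
      simp only [List.foldl_cons, pvStepA]
      simp only [pvCond] at hr
      simp [hr, ih _ (fun x hx => h x (by simp [hx]))]

-- First match found: A removes it and appends the rest.
theorem pvFoldA_found (record_id : String)
    (pre suf : List (List (String × String))) (r : List (String × String))
    (acc : List (List (String × String)))
    (hpre : ∀ p ∈ pre, pvCond record_id p = false)
    (hr : pvCond record_id r = true) :
    (pre ++ r :: suf).foldl (pvStepA record_id) (none, acc) = (some r, acc ++ pre ++ suf) := by
  induction pre generalizing acc with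
  | nil =>
      simp only [pvCond] at hr
      simp [pvStepA, hr, pvFoldA_some]
  | cons p pre ih =>
      have hp : pvCond record_id p = false := hpre p (by simp)
      simp only [pvCond] at hp
      simp only [List.cons_append, List.foldl_cons, pvStepA, hp, Bool.false_and, if_neg]
      have := ih (acc ++ [p]) (fun x hx => hpre x (by simp [hx]))
      simp at this ⊢
      simp [this]

-- If nothing matches, B's match list is empty.
theorem pvMatches_none (record_id : String) (rs : List (List (String × String))) (s : Int)
    (h : ∀ r ∈ rs, pvCond record_id r = false) :
    (PySem.List.enumerate rs s).filter
      (fun p => PySem.Dict.get? (PySem.Dict.mk p.2) "id" == some record_id) = [] := by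
  induction rs generalizing s with
  | nil => simp [PySem.List.enumerate]
  | cons r rs ih =>
      have hr : pvCond record_id r = false := h r (by simp)
      simp only [pvCond] at hr
      simp [PySem.List.enumerate, List.filter, hr, ih _ (fun x hx => h x (by simp [hx]))]

-- First match at position pre.length: B's match list starts with s + pre.length.
theorem pvMatches_found (record_id : String)
    (pre suf : List (List (String × String))) (r : List (String × String)) (s : Int)
    (hpre : ∀ p ∈ pre, pvCond record_id p = false)
    (hr : pvCond record_id r = true) :
    ∃ t, (PySem.List.enumerate (pre ++ r :: suf) s).filter
      (fun p => PySem.Dict.get? (PySem.Dict.mk p.2) "id" == some record_id) = (s + pre.length, r) :: t := by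
  induction pre generalizing s with
  | nil =>
      simp only [pvCond] at hr
      refine ⟨(PySem.List.enumerate suf (s + 1)).filter
        (fun p => PySem.Dict.get? (PySem.Dict.mk p.2) "id" == some record_id), ?_⟩
      simp [PySem.List.enumerate, hr]
  | cons p pre ih =>
      have hp : pvCond record_id p = false := hpre p (by simp)
      simp only [pvCond] at hp
      obtain ⟨t, ht⟩ := ih (s + 1) (fun x hx => hpre x (by simp [hx]))
      refine ⟨t, ?_⟩
      have hlen : s + (((p :: pre).length : Nat) : Int) = (s + 1) + ((pre.length : Nat) : Int) := by
        simp only [List.length_cons]; push_cast; ring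
      rw [hlen]
      simpa [PySem.List.enumerate, hp] using ht

-- Every list either has no match or splits at its first match.
theorem pvSplit (record_id : String) (rs : List (List (String × String))) :
    (∀ r ∈ rs, pvCond record_id r = false) ∨
    ∃ pre r suf, rs = pre ++ r :: suf ∧ (∀ p ∈ pre, pvCond record_id p = false) ∧
      pvCond record_id r = true := by
  induction rs with
  | nil => exact Or.inl (by simp)
  | cons x rs ih =>
      by_cases hx : pvCond record_id x = true
      · exact Or.inr ⟨[], x, rs, by simp, by simp, hx⟩
      · rcases ih with h | ⟨pre, r, suf, hsplit, hpre, hr⟩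
        · exact Or.inl (by
            intro r hrm
            rcases List.mem_cons.mp hrm with rfl | hrm
            · simpa using hx
            · exact h r hrm)
        · exact Or.inr ⟨x :: pre, r, suf, by simp [hsplit], by
            intro p hp
            rcases List.mem_cons.mp hp with rfl | hp
            · simpa using hx
            · exact hpre p hp, hr⟩

-- ===== VERDICT (by name: the statement is the Claim_ definition above) =====
theorem delete_record_spec : Claim_equal_delete_record := by
  intro records record_id _ _
  unfold Spec_delete_record delete_record delete_record_alt
  rcases pvSplit record_id records with h | ⟨pre, r, suf, hsplit, hpre, hr⟩
  · rw [pvMatches_none record_id records 0 h]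
    simp [pvFoldA_none record_id records [] h, sort_records]
  · subst hsplit
    obtain ⟨t, ht⟩ := pvMatches_found record_id pre suf r 0 hpre hr
    rw [ht]
    simp only [pvFoldA_found record_id pre suf r [] hpre hr]
    have h1 : PySem.List.slice (pre ++ r :: suf) none (some ((0 : Int) + pre.length)) = pre := by
      simpa using PySem.List.slice_to_natCast (pre ++ r :: suf) pre.length
    have h2 : PySem.List.slice (pre ++ r :: suf) (some (((pre.length : Nat) : Int) + 1)) none = suf := by
      have he : (((pre.length : Nat) : Int) + 1) = ((pre.length + 1 : Nat) : Int) := by push_cast; ring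
      rw [he, PySem.List.slice_from_natCast]
      simp
    have h3 : PySem.List.pyGetD (pre ++ r :: suf) ((0 : Int) + pre.length) [] = r := by
      simp [PySem.List.pyGetD_natCast]
    simp [h1, h2, h3, sort_records]
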